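-- pv_equiv track=rewrite | github.com/indisoluble/a-healthy-dns | indisoluble/a_healthy_dns/tools/is_valid_subdomain.py | is_valid_subdomain
-- ===== SOURCE A (Python) =====
-- from typing import Any, Tuple
--
-- def is_valid_subdomain(name: Any) -> Tuple[bool, str]:
--     """Validate subdomain name format and character restrictions."""
--     if not isinstance(name, str):
--         return (False, "It must be a string")
--
--     if not name:
--         return (False, "It cannot be empty")
--
--     if not all(
--         label and all(c.isalnum() or c == "-" for c in label)
--         for label in name.split(".")
--     ):
--         return (False, "Labels must contain only alphanumeric characters or hyphens")
--
--     return (True, "")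
-- ===== SOURCE B (Python) =====
-- from typing import Any, Tuple
--
-- _LABEL_ERR = "Labels must contain only alphanumeric characters or hyphens"
--
-- def is_valid_subdomain(name: Any) -> Tuple[bool, str]:
--     """Validate subdomain name format and character restrictions (single pass)."""
--     if not isinstance(name, str):
--         return (False, "It must be a string")
--     if not name:
--         return (False, "It cannot be empty")
--     label_has_char = False
--     for c in name:
--         if c == ".":
--             if not label_has_char:
--                 return (False, _LABEL_ERR)
--             label_has_char = False
--         elif c.isalnum() or c == "-":
--             label_has_char = True
--         else:
--             return (False, _LABEL_ERR)
--     if not label_has_char: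
--         return (False, _LABEL_ERR)
--     return (True, "")
-- ===== Notes on version B (the rewrite author's own statement) =====
-- stated objective: alternative
-- what changed: Replaces the split-on-dot-then-nested-all check with a single left-to-right pass over the characters that tracks only whether the current label is nonempty, returning the error eagerly at the first bad character or empty label.
import Mathlib
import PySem

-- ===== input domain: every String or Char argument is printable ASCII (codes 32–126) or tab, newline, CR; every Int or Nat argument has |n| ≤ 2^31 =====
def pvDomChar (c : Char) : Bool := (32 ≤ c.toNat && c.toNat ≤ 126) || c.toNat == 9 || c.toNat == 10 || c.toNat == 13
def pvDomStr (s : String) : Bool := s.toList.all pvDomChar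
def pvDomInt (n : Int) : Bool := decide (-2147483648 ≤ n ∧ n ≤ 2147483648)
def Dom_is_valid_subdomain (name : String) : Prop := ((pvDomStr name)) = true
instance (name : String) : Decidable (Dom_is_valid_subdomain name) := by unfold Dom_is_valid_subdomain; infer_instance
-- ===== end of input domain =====

-- B replaces A's split-on-dot-plus-nested-all check by one pass over the characters that only
-- tracks whether the current label is nonempty (objective: alternative decomposition, no
-- intermediate label list, early exit). name : String, so A's isinstance guard is always passed.

-- ===== PORT A =====
-- literal port of A: split on the dot separator, check every label nonempty with only alnum/'-' characters
def is_valid_subdomain (name : String) : Bool × String :=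
  if name.toList = [] then (false, "It cannot be empty")
  else if !((PySem.Chars.splitOn name.toList ['.']).all
      (fun label => !label.isEmpty && label.all (fun c => PySem.Chars.isalnum c || c == '-'))) then
    (false, "Labels must contain only alphanumeric characters or hyphens")
  else (true, "")

-- ===== PORT B =====
-- single pass: `has` = current label already has at least one character
def validGo : List Char → Bool → Bool × String
  | [], has =>
      if has then (true, "") else (false, "Labels must contain only alphanumeric characters or hyphens")
  | c :: rest, has =>
      if c == '.' then
        if has then validGo rest false
        else (false, "Labels must contain only alphanumeric characters or hyphens")
      else if PySem.Chars.isalnum c || c == '-' then validGo rest true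
      else (false, "Labels must contain only alphanumeric characters or hyphens")

def is_valid_subdomain_alt (name : String) : Bool × String :=
  if name.toList = [] then (false, "It cannot be empty")
  else validGo name.toList false

-- ===== PRECONDITION & SPEC =====
def Spec_is_valid_subdomain (name : String) (out : Bool × String) : Prop := out = is_valid_subdomain_alt name
instance (name : String) (out : Bool × String) : Decidable (Spec_is_valid_subdomain name out) := by unfold Spec_is_valid_subdomain; infer_instance

-- ===== CLAIM (what is proved, stated in full; the proofs are below) =====
def Claim_equal_is_valid_subdomain : Prop := ∀ (name : String), Dom_is_valid_subdomain name → Spec_is_valid_subdomain name (is_valid_subdomain name)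

-- ===== LEMMAS AND PROOFS =====

-- proof-side model of split('.'): structural recursion over the characters
def splitDot : List Char → List (List Char)
  | [] => [[]]
  | c :: rest => if c = '.' then [] :: splitDot rest else (splitDot rest).modifyHead (c :: ·)

def okChar (c : Char) : Bool := PySem.Chars.isalnum c || c == '-'

def okLabel (l : List Char) : Bool := !l.isEmpty && l.all okChar

lemma splitDot_ne_nil (cs : List Char) : splitDot cs ≠ [] := by
  induction cs with
  | nil => simp [splitDot]
  | cons c rest ih =>
    simp only [splitDot]
    split
    · simp
    · cases h : splitDot rest with
      | nil => exact absurd h ih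
      | cons a t => simp

lemma splitDot_cons_exists (cs : List Char) : ∃ a t, splitDot cs = a :: t := by
  cases h : splitDot cs with
  | nil => exact absurd h (splitDot_ne_nil cs)
  | cons a t => exact ⟨a, t, rfl⟩

lemma splitOn_go_spec (fuel : Nat) (l cur : List Char) (acc : List (List Char))
    (h : l.length < fuel) :
    PySem.Chars.splitOn.go ['.'] fuel l cur acc
      = acc.reverse ++ (splitDot l).modifyHead (cur.reverse ++ ·) := by
  induction fuel generalizing l cur acc with
  | zero => omega
  | succ n ih =>
    cases l with
    | nil =>
      simp [PySem.Chars.splitOn.go, splitDot]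
    | cons c rest =>
      by_cases hc : c = '.'
      · subst hc
        have hpre : List.isPrefixOf ['.'] ('.' :: rest) = true := by simp
        rw [PySem.Chars.splitOn.go, if_pos hpre]
        have hstep := ih rest [] (cur.reverse :: acc) (by simpa using Nat.lt_of_succ_lt_succ h)
        obtain ⟨a, t, ht⟩ := splitDot_cons_exists rest
        simp only [List.length_cons, List.length_nil, List.drop_succ_cons, List.drop_zero]
        rw [hstep]
        simp [splitDot, ht]
      · have hpre : List.isPrefixOf ['.'] (c :: rest) = false := by
          simp [List.isPrefixOf]
          exact fun h => hc h.symm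
        rw [PySem.Chars.splitOn.go, if_neg (by simp [hpre])]
        rw [ih rest (c :: cur) acc (by simpa using Nat.lt_of_succ_lt_succ h)]
        obtain ⟨a, t, ht⟩ := splitDot_cons_exists rest
        simp [splitDot, hc, ht]

lemma splitOn_eq_splitDot (cs : List Char) :
    PySem.Chars.splitOn cs ['.'] = splitDot cs := by
  have hgo := splitOn_go_spec (cs.length + 1) cs [] [] (by omega)
  obtain ⟨a, t, ht⟩ := splitDot_cons_exists cs
  rw [PySem.Chars.splitOn, hgo, ht]
  simp

-- the single pass computes the split-based condition, with `has` standing for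
-- "the current label already has a character"
def dotCond (has : Bool) (cs : List Char) : Bool :=
  ((has || !(splitDot cs).headI.isEmpty) && (splitDot cs).headI.all okChar)
    && ((splitDot cs).tail.all okLabel)

lemma validGo_eq_dotCond (cs : List Char) (has : Bool) :
    validGo cs has =
      (if dotCond has cs then (true, "")
       else (false, "Labels must contain only alphanumeric characters or hyphens")) := by
  induction cs generalizing has with
  | nil => cases has <;> simp [validGo, dotCond, splitDot]
  | cons c rest ih =>
    obtain ⟨a, t, ht⟩ := splitDot_cons_exists rest
    by_cases hc : c = '.'
    · subst hc
      cases has with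
      | false => simp [validGo, dotCond, splitDot, ht]
      | true =>
        rw [show validGo ('.' :: rest) true = validGo rest false by simp [validGo]]
        rw [ih false]
        simp [dotCond, splitDot, ht, okLabel, Bool.and_assoc]
    · by_cases hok : okChar c = true
      · rw [show validGo (c :: rest) has = validGo rest true by
          simp only [okChar] at hok; simp [validGo, hc, hok]]
        rw [ih true]
        simp only [okChar] at hok
        simp [dotCond, splitDot, hc, ht, okChar, hok]
      · simp only [okChar, Bool.or_eq_true, not_or, Bool.not_eq_true] at hok
        have hval : validGo (c :: rest) has =
            (false, "Labels must contain only alphanumeric characters or hyphens") := by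
          simp [validGo, hc, hok.1, hok.2]
        have hcond : dotCond has (c :: rest) = false := by
          simp [dotCond, splitDot, hc, ht, okChar, hok.1, hok.2]
        rw [hval, hcond]
        simp

-- ===== VERDICT (by name: the statement is the Claim_ definition above) =====
theorem is_valid_subdomain_spec : Claim_equal_is_valid_subdomain := by
  intro name _
  unfold Spec_is_valid_subdomain is_valid_subdomain is_valid_subdomain_alt
  by_cases hnil : name.toList = []
  · simp [hnil]
  · rw [if_neg hnil, if_neg hnil, validGo_eq_dotCond, splitOn_eq_splitDot]
    obtain ⟨a, t, ht⟩ := splitDot_cons_exists name.toList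
    have hdc : dotCond false name.toList = (okLabel a && t.all okLabel) := by
      simp [dotCond, ht, okLabel, Bool.and_assoc]
    have hfun : (fun label => !label.isEmpty && label.all (fun c => PySem.Chars.isalnum c || c == '-'))
        = okLabel := by
      rfl
    rw [hfun, hdc, ht]
    simp only [List.all_cons]
    by_cases hb : (okLabel a && t.all okLabel) = true <;> simp [hb]
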